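-- pv_equiv track=rewrite | github.com/musanduati/BrainLiftTracker | workflowy/test_workflowy.py | extract_dok_sections_from_content
-- ===== SOURCE A (Python) =====
-- def extract_dok_sections_from_content(content: str) -> str:
--     """
--     Extract only DOK4 and DOK3 sections from the clean markdown content.
--     Only looks for DOK4/DOK3 at the correct high-level indentation (2 spaces).
--     """
--     lines = content.split('\n')
--     filtered_lines = []
--     capturing = False
--     dok_indent_level = 2  # DOK4 and DOK3 are at 2 spaces indentation
--
--     for line in lines:
--         # Calculate the indentation level
--         stripped = line.lstrip()
--         if stripped:
--             indent = len(line) - len(stripped)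
--
--             # Check if this is a DOK4 or DOK3 section header at the correct level
--             if (indent == dok_indent_level and
--                 (stripped.startswith('- DOK4') or stripped.startswith('- DOK3'))):
--                 capturing = True
--                 filtered_lines.append(line)
--
--             # If we're capturing and this line has greater indentation than DOK level, include it
--             elif capturing and indent > dok_indent_level:
--                 filtered_lines.append(line)
--
--             # If we hit a line at DOK level or less that's not DOK4/DOK3, stop capturing
--             elif capturing and indent <= dok_indent_level:
--                 if (indent == dok_indent_level and
--                     (stripped.startswith('- DOK4') or stripped.startswith('- DOK3'))):
--                     # Start a new DOK section
--                     filtered_lines.append(line)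
--                 else:
--                     # End of current DOK section
--                     capturing = False
--         else:
--             # Empty line - include if we're currently capturing
--             if capturing:
--                 filtered_lines.append(line)
--
--     return '\n'.join(filtered_lines)
-- ===== SOURCE B (Python) =====
-- def extract_dok_sections_from_content(content: str) -> str:
--     """Chunk-based re-implementation: group the lines into chunks, each chunk
--     opened by a 'boundary' line (non-empty, indent <= 2); keep exactly the
--     chunks whose opening line is a DOK3/DOK4 header at indent 2."""
--     def _parts(line):
--         s = line.lstrip()
--         return s, len(line) - len(s)
--
--     def _is_boundary(line):
--         s, ind = _parts(line)
--         return bool(s) and ind <= 2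
--
--     def _is_start(line):
--         s, ind = _parts(line)
--         return bool(s) and ind == 2 and (s.startswith('- DOK4') or s.startswith('- DOK3'))
--
--     chunks = []          # completed chunks, each a list of lines
--     current = None       # lines before the first boundary belong to no chunk
--     for line in content.split('\n'):
--         if _is_boundary(line):
--             if current is not None:
--                 chunks.append(current)
--             current = [line]
--         elif current is not None:
--             current.append(line)
--     if current is not None:
--         chunks.append(current)
--
--     out = [l for ch in chunks if _is_start(ch[0]) for l in ch]
--     return '\n'.join(out)
-- ===== Notes on version B (the rewrite author's own statement) =====
-- stated objective: alternative
-- what changed: A's single streaming scan with a capturing flag is replaced by a two-phase grouping: the lines are first grouped into chunks, each opened at a shallow non-empty boundary line, and then exactly the chunks whose opening line is a DOK section header are kept, flattened and joined.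
import Mathlib
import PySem

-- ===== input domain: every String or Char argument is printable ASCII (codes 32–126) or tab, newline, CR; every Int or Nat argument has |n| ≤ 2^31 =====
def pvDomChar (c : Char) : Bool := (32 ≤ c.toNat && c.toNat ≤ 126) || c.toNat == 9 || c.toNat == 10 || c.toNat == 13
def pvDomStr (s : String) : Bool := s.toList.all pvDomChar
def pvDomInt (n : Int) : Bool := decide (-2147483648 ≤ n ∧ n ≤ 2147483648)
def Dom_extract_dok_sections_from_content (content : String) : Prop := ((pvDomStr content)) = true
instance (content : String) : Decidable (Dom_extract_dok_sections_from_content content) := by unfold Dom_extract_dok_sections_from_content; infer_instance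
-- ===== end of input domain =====

-- B replaces A's streaming 'capturing' flag with a chunk table (group the lines into chunks opened at boundary lines, keep the DOK-headed chunks); objective: alternative decomposition, same cost.

-- ===== PORT A =====
-- one step of A's for-loop: state = (filtered_lines, capturing)
def pvAStep (st : List String × Bool) (line : String) : List String × Bool :=
  let stripped := PySem.Str.lstrip line
  if stripped ≠ "" then
    let indent : Int := PySem.Str.len line - PySem.Str.len stripped
    if indent = 2 ∧ (PySem.Str.startswith stripped "- DOK4" ∨ PySem.Str.startswith stripped "- DOK3") then
      (st.1 ++ [line], true)
    else if st.2 ∧ indent > 2 then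
      (st.1 ++ [line], st.2)
    else if st.2 ∧ indent ≤ 2 then
      if indent = 2 ∧ (PySem.Str.startswith stripped "- DOK4" ∨ PySem.Str.startswith stripped "- DOK3") then
        (st.1 ++ [line], st.2)
      else
        (st.1, false)
    else st
  else
    if st.2 then (st.1 ++ [line], st.2) else st

def extract_dok_sections_from_content (content : String) : String :=
  let lines := (PySem.Str.split? content "\n").getD []   -- sep "\n" ≠ "", so split? is some
  PySem.Str.join "\n" (lines.foldl pvAStep ([], false)).1

-- ===== PORT B =====
def pvIsBoundary (line : String) : Bool :=
  let s := PySem.Str.lstrip line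
  s ≠ "" ∧ PySem.Str.len line - PySem.Str.len s ≤ 2

def pvIsStart (line : String) : Bool :=
  let s := PySem.Str.lstrip line
  s ≠ "" ∧ PySem.Str.len line - PySem.Str.len s = 2 ∧
    (PySem.Str.startswith s "- DOK4" ∨ PySem.Str.startswith s "- DOK3")

-- one step of B's chunking loop: state = (chunks, current)
def pvChunkStep (st : List (List String) × Option (List String)) (line : String) :
    List (List String) × Option (List String) :=
  if pvIsBoundary line then
    (match st.2 with | none => st.1 | some c => st.1 ++ [c], some [line])
  else
    match st.2 with
    | none => st
    | some c => (st.1, some (c ++ [line]))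

-- the trailing 'if current is not None: chunks.append(current)'
def pvClose (st : List (List String) × Option (List String)) : List (List String) :=
  match st.2 with | none => st.1 | some c => st.1 ++ [c]

-- 'is_start(ch[0])' (every chunk is non-empty, so the headD default is never read)
def pvGoodHead (ch : List String) : Bool :=
  match ch.head? with | some h => pvIsStart h | none => false

def extract_dok_sections_from_content_alt (content : String) : String :=
  let lines := (PySem.Str.split? content "\n").getD []   -- sep "\n" ≠ "", so split? is some
  let chunks := pvClose (lines.foldl pvChunkStep ([], none))
  PySem.Str.join "\n" ((chunks.filter pvGoodHead).flatMap id)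

-- ===== PRECONDITION & SPEC =====
def Spec_extract_dok_sections_from_content (content : String) (out : String) : Prop := out = extract_dok_sections_from_content_alt content
instance (content : String) (out : String) : Decidable (Spec_extract_dok_sections_from_content content out) := by unfold Spec_extract_dok_sections_from_content; infer_instance

-- ===== CLAIM (what is proved, stated in full; the proofs are below) =====
def Claim_equal_extract_dok_sections_from_content : Prop := ∀ (content : String), Dom_extract_dok_sections_from_content content → Spec_extract_dok_sections_from_content content (extract_dok_sections_from_content content)

-- ===== LEMMAS AND PROOFS =====

-- A's step on a DOK header line
theorem pvAStep_start (st : List String × Bool) (line : String)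
    (h : pvIsStart line = true) : pvAStep st line = (st.1 ++ [line], true) := by
  simp only [pvIsStart, decide_eq_true_eq] at h
  obtain ⟨hs, hi, hw⟩ := h
  obtain ⟨acc, cap⟩ := st
  simp only [pvAStep]
  rw [if_pos hs, if_pos ⟨hi, hw⟩]

-- A's step on a non-DOK boundary line
theorem pvAStep_bdry (st : List String × Bool) (line : String)
    (h1 : pvIsStart line = false) (h2 : pvIsBoundary line = true) :
    pvAStep st line = (st.1, false) := by
  simp only [pvIsStart, decide_eq_false_iff_not] at h1
  simp only [pvIsBoundary, decide_eq_true_eq] at h2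
  obtain ⟨hs, hle⟩ := h2
  have hP : ¬ (PySem.Str.len line - PySem.Str.len (PySem.Str.lstrip line) = 2 ∧
      (PySem.Str.startswith (PySem.Str.lstrip line) "- DOK4" = true ∨
       PySem.Str.startswith (PySem.Str.lstrip line) "- DOK3" = true)) := by
    intro hc; exact h1 ⟨hs, hc.1, hc.2⟩
  obtain ⟨acc, cap⟩ := st
  simp only [pvAStep]
  rw [if_pos hs, if_neg hP]
  cases cap
  · rw [if_neg (by simp), if_neg (by simp)]
  · rw [if_neg (fun hc => absurd hc.2 (by omega)), if_pos ⟨rfl, hle⟩, if_neg hP]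

-- A's step on a non-boundary line (all-whitespace, or deeper than indent 2)
theorem pvAStep_other (st : List String × Bool) (line : String)
    (h : pvIsBoundary line = false) :
    pvAStep st line = (st.1 ++ (if st.2 then [line] else []), st.2) := by
  simp only [pvIsBoundary, decide_eq_false_iff_not] at h
  obtain ⟨acc, cap⟩ := st
  by_cases hs : PySem.Str.lstrip line = ""
  · simp only [pvAStep]
    rw [if_neg (by simpa using hs)]
    cases cap <;> simp
  · have hgt : PySem.Str.len line - PySem.Str.len (PySem.Str.lstrip line) > 2 := by
      by_contra hc
      exact h ⟨hs, by omega⟩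
    have hP : ¬ (PySem.Str.len line - PySem.Str.len (PySem.Str.lstrip line) = 2 ∧
        (PySem.Str.startswith (PySem.Str.lstrip line) "- DOK4" = true ∨
         PySem.Str.startswith (PySem.Str.lstrip line) "- DOK3" = true)) := by
    -- the indent is > 2, so it is not = 2
      intro hc; omega
    simp only [pvAStep]
    rw [if_pos hs, if_neg hP]
    cases cap
    · rw [if_neg (by simp), if_neg (by simp)]; simp
    · rw [if_pos ⟨rfl, hgt⟩]; simp

theorem pvStart_bdry (line : String) (h : pvIsStart line = true) : pvIsBoundary line = true := by
  simp only [pvIsStart, decide_eq_true_eq] at h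
  simp only [pvIsBoundary, decide_eq_true_eq]
  exact ⟨h.1, by omega⟩

-- B's closed chunk list for a run starting from (chunks = [], current = cur)
def pvRun (ls : List String) (cur : Option (List String)) : List (List String) :=
  pvClose (ls.foldl pvChunkStep ([], cur))

-- chunkStep only ever appends to the chunk list
theorem pvChunkStep_fst_append (ls : List String) (pre chunks : List (List String))
    (cur : Option (List String)) :
    ls.foldl pvChunkStep (pre ++ chunks, cur) =
      (pre ++ (ls.foldl pvChunkStep (chunks, cur)).1, (ls.foldl pvChunkStep (chunks, cur)).2) := by
  induction ls generalizing chunks cur with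
  | nil => simp
  | cons l ls ih =>
    simp only [List.foldl_cons, pvChunkStep]
    by_cases hb : pvIsBoundary l
    · cases cur <;> simp [hb, ih]
    · cases cur <;> simp [hb, ih]

theorem pvRun_boundary (l : String) (ls : List String) (cur : Option (List String))
    (hb : pvIsBoundary l = true) :
    pvRun (l :: ls) cur = pvClose ([], cur) ++ pvRun ls (some [l]) := by
  simp only [pvRun, List.foldl_cons, pvChunkStep, hb, if_true]
  cases cur with
  | none => simp [pvClose]
  | some c =>
    have := pvChunkStep_fst_append ls [c] [] (some [l])
    simp only [List.append_nil] at this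
    show pvClose (ls.foldl pvChunkStep ([c], some [l])) =
      pvClose ([], some c) ++ pvClose (ls.foldl pvChunkStep ([], some [l]))
    rw [this]
    cases h : (ls.foldl pvChunkStep ([], some [l])).2 <;> simp [pvClose, h]

theorem pvRun_other (l : String) (ls : List String) (cur : Option (List String))
    (hb : pvIsBoundary l = false) :
    pvRun (l :: ls) cur =
      match cur with
      | none => pvRun ls none
      | some c => pvRun ls (some (c ++ [l])) := by
  cases cur <;> simp [pvRun, List.foldl_cons, pvChunkStep, hb]

-- the "capturing" flag and captured tail of A, read off B's open chunk
def pvCapOf (cur : Option (List String)) : Bool :=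
  match cur with | none => false | some c => pvGoodHead c

def pvEmit (cur : Option (List String)) : List String :=
  match cur with | none => [] | some c => if pvGoodHead c then c else []

theorem pvEmit_eq_filter (cur : Option (List String)) :
    ((pvClose ([], cur)).filter pvGoodHead).flatMap id = pvEmit cur := by
  cases cur with
  | none => simp [pvClose, pvEmit]
  | some c => by_cases h : pvGoodHead c <;> simp [pvClose, pvEmit, h]

-- the loop invariant: A's fold = already-emitted output ++ B's chunked output
theorem pvMain (ls : List String) (acc : List String) (cur : Option (List String))
    (hcur : ∀ c, cur = some c → c ≠ []) :
    (ls.foldl pvAStep (acc ++ pvEmit cur, pvCapOf cur)).1 =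
      acc ++ ((pvRun ls cur).filter pvGoodHead).flatMap id := by
  induction ls generalizing acc cur with
  | nil =>
    simp only [List.foldl_nil, pvRun, List.foldl_nil]
    rw [pvEmit_eq_filter]
  | cons l ls ih =>
    by_cases hst : pvIsStart l = true
    · have hb := pvStart_bdry l hst
      rw [List.foldl_cons, pvAStep_start _ _ hst]
      have h1 : ((acc ++ pvEmit cur, pvCapOf cur).1 ++ [l], true) =
          ((acc ++ pvEmit cur) ++ pvEmit (some [l]), pvCapOf (some [l])) := by
        simp [pvEmit, pvCapOf, pvGoodHead, hst]
      rw [h1, ih (acc ++ pvEmit cur) (some [l]) (by intro c hc; cases hc; simp)]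
      rw [pvRun_boundary l ls cur hb]
      simp only [List.filter_append, List.flatMap_append]
      rw [pvEmit_eq_filter]
      simp
    · have hst' : pvIsStart l = false := by simpa using hst
      by_cases hb : pvIsBoundary l = true
      · rw [List.foldl_cons, pvAStep_bdry _ _ hst' hb]
        have h1 : ((acc ++ pvEmit cur, pvCapOf cur).1, false) =
            ((acc ++ pvEmit cur) ++ pvEmit (some [l]), pvCapOf (some [l])) := by
          simp [pvEmit, pvCapOf, pvGoodHead, hst']
        rw [h1, ih (acc ++ pvEmit cur) (some [l]) (by intro c hc; cases hc; simp)]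
        rw [pvRun_boundary l ls cur hb]
        simp only [List.filter_append, List.flatMap_append]
        rw [pvEmit_eq_filter]
        simp
      · have hb' : pvIsBoundary l = false := by simpa using hb
        rw [List.foldl_cons, pvAStep_other _ _ hb']
        rw [pvRun_other l ls cur hb']
        cases cur with
        | none =>
          have := ih acc none (by intro c hc; cases hc)
          simpa [pvEmit, pvCapOf] using this
        | some c =>
          have hc : c ≠ [] := hcur c rfl
          have hg : pvGoodHead (c ++ [l]) = pvGoodHead c := by
            cases c with
            | nil => exact absurd rfl hc
            | cons h t => simp [pvGoodHead]
          have h1 : ((acc ++ pvEmit (some c), pvCapOf (some c)).1 ++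
                (if (acc ++ pvEmit (some c), pvCapOf (some c)).2 then [l] else []),
              (acc ++ pvEmit (some c), pvCapOf (some c)).2) =
              (acc ++ pvEmit (some (c ++ [l])), pvCapOf (some (c ++ [l]))) := by
            simp only [pvEmit, pvCapOf, hg]
            by_cases hgc : pvGoodHead c = true <;> simp [hgc]
          rw [h1]
          exact ih acc (some (c ++ [l])) (by intro d hd; cases hd; simp)

-- ===== VERDICT (by name: the statement is the Claim_ definition above) =====
theorem extract_dok_sections_from_content_spec : Claim_equal_extract_dok_sections_from_content := by
  intro content _
  unfold Spec_extract_dok_sections_from_content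
  simp only [extract_dok_sections_from_content, extract_dok_sections_from_content_alt]
  have h := pvMain ((PySem.Str.split? content "\n").getD []) [] none (by intro c hc; cases hc)
  simp only [pvEmit, pvCapOf, List.append_nil, List.nil_append, pvRun] at h
  rw [h]
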